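-- pv_equiv track=rewrite | github.com/Potato0705/BSPAR | bspar/data/span_utils.py | compute_distance_bucket
-- ===== SOURCE A (Python) =====
-- def compute_distance_bucket(asp_start, asp_end, opn_start, opn_end,
--                             num_buckets: int = 16) -> int:
--     """Compute bucketed distance between aspect and opinion spans.
--
--     Distance = minimum token gap between two spans.
--     Bucketed logarithmically for robustness.
--
--     Returns bucket index in [0, num_buckets).
--     """
--     if asp_start == -1 or opn_start == -1:
--         return num_buckets - 1  # special bucket for NULL involvement
--
--     if asp_end < opn_start:
--         dist = opn_start - asp_end - 1
--     elif opn_end < asp_start: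
--         dist = asp_start - opn_end - 1
--     else:
--         dist = 0  # overlapping spans
--
--     # Logarithmic bucketing: 0, 1, 2, 3, 4-5, 6-8, 9-13, 14-20, 21+
--     bucket_boundaries = [0, 1, 2, 3, 5, 8, 13, 20, 30, 50, 80, 120, 200, 500, 1000]
--     for b, boundary in enumerate(bucket_boundaries):
--         if dist <= boundary:
--             return min(b, num_buckets - 2)
--     return num_buckets - 2
-- ===== SOURCE B (Python) =====
-- _BOUNDARIES = [0, 1, 2, 3, 5, 8, 13, 20, 30, 50, 80, 120, 200, 500, 1000]
--
--
-- def _bisect_left(xs, x):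
--     """Index of first element >= x in sorted xs (binary search)."""
--     lo, hi = 0, len(xs)
--     while lo < hi:
--         mid = (lo + hi) // 2
--         if xs[mid] < x:
--             lo = mid + 1
--         else:
--             hi = mid
--     return lo
--
--
-- def compute_distance_bucket(asp_start, asp_end, opn_start, opn_end,
--                             num_buckets: int = 16) -> int:
--     if asp_start == -1 or opn_start == -1:
--         return num_buckets - 1
--     if asp_end < opn_start:
--         dist = opn_start - asp_end - 1
--     else:
--         dist = max(0, asp_start - opn_end - 1)
--     i = _bisect_left(_BOUNDARIES, dist)
--     return min(i, num_buckets - 2) if i < len(_BOUNDARIES) else num_buckets - 2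
-- ===== Notes on version B (the rewrite author's own statement) =====
-- stated objective: alternative
-- what changed: Collapses the three-way gap branch into one expression using max, and replaces the linear scan over the boundary list with a binary search (bisect_left) for the bucket index.
import Mathlib
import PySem

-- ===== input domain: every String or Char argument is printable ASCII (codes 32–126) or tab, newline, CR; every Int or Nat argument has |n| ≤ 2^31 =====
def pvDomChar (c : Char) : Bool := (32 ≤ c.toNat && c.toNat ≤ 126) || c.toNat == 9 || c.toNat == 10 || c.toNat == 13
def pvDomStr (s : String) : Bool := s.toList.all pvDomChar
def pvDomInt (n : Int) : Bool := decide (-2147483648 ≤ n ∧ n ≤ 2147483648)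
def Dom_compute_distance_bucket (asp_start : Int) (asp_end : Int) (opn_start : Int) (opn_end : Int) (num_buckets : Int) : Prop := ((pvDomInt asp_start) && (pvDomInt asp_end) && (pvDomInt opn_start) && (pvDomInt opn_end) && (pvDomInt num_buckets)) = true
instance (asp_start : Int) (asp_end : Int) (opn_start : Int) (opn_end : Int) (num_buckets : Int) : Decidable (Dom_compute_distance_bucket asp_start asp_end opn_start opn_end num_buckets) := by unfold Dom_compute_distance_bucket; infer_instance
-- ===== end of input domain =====

-- B collapses A's three-way gap branch into a max expression and replaces the linear
-- boundary scan with a binary search; the return values are proved equal on all inputs (A is total).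

-- ===== PORT A =====
-- the 'for b, boundary in enumerate(bucket_boundaries)' loop with early return;
-- falls through to num_buckets - 2
def pvBucketLoop (dist : Int) (num_buckets : Int) : List (Int × Int) → Int
  | [] => num_buckets - 2
  | (b, boundary) :: rest =>
      if dist ≤ boundary then min b (num_buckets - 2) else pvBucketLoop dist num_buckets rest

def compute_distance_bucket (asp_start : Int) (asp_end : Int) (opn_start : Int) (opn_end : Int) (num_buckets : Int) : Int :=
  if asp_start = -1 ∨ opn_start = -1 then num_buckets - 1
  else
    let dist : Int :=
      if asp_end < opn_start then opn_start - asp_end - 1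
      else if opn_end < asp_start then asp_start - opn_end - 1
      else 0
    -- enumerate(bucket_boundaries) as an explicit (index, boundary) list
    pvBucketLoop dist num_buckets
      [(0,0),(1,1),(2,2),(3,3),(4,5),(5,8),(6,13),(7,20),(8,30),(9,50),(10,80),(11,120),(12,200),(13,500),(14,1000)]

-- ===== PORT B =====
def pvBoundariesB : List Int := [0, 1, 2, 3, 5, 8, 13, 20, 30, 50, 80, 120, 200, 500, 1000]

-- Source B's _bisect_left while-loop; xs.getD mid 0 is exact for xs[mid] since 0 ≤ mid < xs.length inside the loop
def pvBisectLeft (xs : List Int) (x : Int) (lo hi : Nat) : Nat :=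
  if _h : lo < hi then
    let mid := (lo + hi) / 2
    if xs.getD mid 0 < x then pvBisectLeft xs x (mid + 1) hi else pvBisectLeft xs x lo mid
  else lo
termination_by hi - lo
decreasing_by all_goals omega

def compute_distance_bucket_alt (asp_start : Int) (asp_end : Int) (opn_start : Int) (opn_end : Int) (num_buckets : Int) : Int :=
  if asp_start = -1 ∨ opn_start = -1 then num_buckets - 1
  else
    let dist : Int :=
      if asp_end < opn_start then opn_start - asp_end - 1
      else max 0 (asp_start - opn_end - 1)
    let i := pvBisectLeft pvBoundariesB dist 0 pvBoundariesB.length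
    if i < pvBoundariesB.length then min (i : Int) (num_buckets - 2) else num_buckets - 2

-- ===== PRECONDITION & SPEC =====
def Spec_compute_distance_bucket (asp_start : Int) (asp_end : Int) (opn_start : Int) (opn_end : Int) (num_buckets : Int) (out : Int) : Prop := out = compute_distance_bucket_alt asp_start asp_end opn_start opn_end num_buckets
instance (asp_start : Int) (asp_end : Int) (opn_start : Int) (opn_end : Int) (num_buckets : Int) (out : Int) : Decidable (Spec_compute_distance_bucket asp_start asp_end opn_start opn_end num_buckets out) := by unfold Spec_compute_distance_bucket; infer_instance

-- ===== CLAIM (what is proved, stated in full; the proofs are below) =====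
def Claim_equal_compute_distance_bucket : Prop := ∀ (asp_start : Int) (asp_end : Int) (opn_start : Int) (opn_end : Int) (num_buckets : Int), Dom_compute_distance_bucket asp_start asp_end opn_start opn_end num_buckets → Spec_compute_distance_bucket asp_start asp_end opn_start opn_end num_buckets (compute_distance_bucket asp_start asp_end opn_start opn_end num_buckets)

-- ===== LEMMAS AND PROOFS =====
-- one step of the binary search: comparison true / comparison false / loop exit
theorem pvBL_true {xs : List Int} {x : Int} {lo hi : Nat} (h : lo < hi)
    (hc : xs.getD ((lo + hi) / 2) 0 < x) :
    pvBisectLeft xs x lo hi = pvBisectLeft xs x ((lo + hi) / 2 + 1) hi := by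
  rw [pvBisectLeft]; simp only [dif_pos h]; rw [if_pos hc]

theorem pvBL_false {xs : List Int} {x : Int} {lo hi : Nat} (h : lo < hi)
    (hc : ¬ xs.getD ((lo + hi) / 2) 0 < x) :
    pvBisectLeft xs x lo hi = pvBisectLeft xs x lo ((lo + hi) / 2) := by
  rw [pvBisectLeft]; simp only [dif_pos h]; rw [if_neg hc]

theorem pvBL_done {xs : List Int} {x : Int} {lo hi : Nat} (h : ¬ lo < hi) :
    pvBisectLeft xs x lo hi = lo := by
  rw [pvBisectLeft]; simp only [dif_neg h]

-- B's binary search evaluated into a chain of threshold tests on the distance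
set_option maxHeartbeats 1600000 in
theorem pvBisect_eval (d : Int) :
    pvBisectLeft pvBoundariesB d 0 pvBoundariesB.length =
      (if d ≤ 0 then 0 else if d ≤ 1 then 1 else if d ≤ 2 then 2 else if d ≤ 3 then 3
       else if d ≤ 5 then 4 else if d ≤ 8 then 5 else if d ≤ 13 then 6 else if d ≤ 20 then 7
       else if d ≤ 30 then 8 else if d ≤ 50 then 9 else if d ≤ 80 then 10 else if d ≤ 120 then 11
       else if d ≤ 200 then 12 else if d ≤ 500 then 13 else if d ≤ 1000 then 14 else 15) := by
  have hlen : pvBoundariesB.length = 15 := rfl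
  rw [hlen]
  by_cases h0 : d ≤ 0
  · rw [if_pos h0]
    rw [pvBL_false (by norm_num) (by norm_num [pvBoundariesB, List.getD]; omega)]
    rw [pvBL_false (by norm_num) (by norm_num [pvBoundariesB, List.getD]; omega)]
    rw [pvBL_false (by norm_num) (by norm_num [pvBoundariesB, List.getD]; omega)]
    rw [pvBL_false (by norm_num) (by norm_num [pvBoundariesB, List.getD]; omega)]
    rw [pvBL_done (by norm_num)]
  · rw [if_neg h0]
    by_cases h1 : d ≤ 1
    · rw [if_pos h1]
      rw [pvBL_false (by norm_num) (by norm_num [pvBoundariesB, List.getD]; omega)]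
      rw [pvBL_false (by norm_num) (by norm_num [pvBoundariesB, List.getD]; omega)]
      rw [pvBL_false (by norm_num) (by norm_num [pvBoundariesB, List.getD]; omega)]
      rw [pvBL_true (by norm_num) (by norm_num [pvBoundariesB, List.getD]; omega)]
      rw [pvBL_done (by norm_num)]
    · rw [if_neg h1]
      by_cases h2 : d ≤ 2
      · rw [if_pos h2]
        rw [pvBL_false (by norm_num) (by norm_num [pvBoundariesB, List.getD]; omega)]
        rw [pvBL_false (by norm_num) (by norm_num [pvBoundariesB, List.getD]; omega)]
        rw [pvBL_true (by norm_num) (by norm_num [pvBoundariesB, List.getD]; omega)]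
        rw [pvBL_false (by norm_num) (by norm_num [pvBoundariesB, List.getD]; omega)]
        rw [pvBL_done (by norm_num)]
      · rw [if_neg h2]
        by_cases h3 : d ≤ 3
        · rw [if_pos h3]
          rw [pvBL_false (by norm_num) (by norm_num [pvBoundariesB, List.getD]; omega)]
          rw [pvBL_false (by norm_num) (by norm_num [pvBoundariesB, List.getD]; omega)]
          rw [pvBL_true (by norm_num) (by norm_num [pvBoundariesB, List.getD]; omega)]
          rw [pvBL_true (by norm_num) (by norm_num [pvBoundariesB, List.getD]; omega)]
          rw [pvBL_done (by norm_num)]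
        · rw [if_neg h3]
          by_cases h4 : d ≤ 5
          · rw [if_pos h4]
            rw [pvBL_false (by norm_num) (by norm_num [pvBoundariesB, List.getD]; omega)]
            rw [pvBL_true (by norm_num) (by norm_num [pvBoundariesB, List.getD]; omega)]
            rw [pvBL_false (by norm_num) (by norm_num [pvBoundariesB, List.getD]; omega)]
            rw [pvBL_false (by norm_num) (by norm_num [pvBoundariesB, List.getD]; omega)]
            rw [pvBL_done (by norm_num)]
          · rw [if_neg h4]
            by_cases h5 : d ≤ 8
            · rw [if_pos h5]
              rw [pvBL_false (by norm_num) (by norm_num [pvBoundariesB, List.getD]; omega)]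
              rw [pvBL_true (by norm_num) (by norm_num [pvBoundariesB, List.getD]; omega)]
              rw [pvBL_false (by norm_num) (by norm_num [pvBoundariesB, List.getD]; omega)]
              rw [pvBL_true (by norm_num) (by norm_num [pvBoundariesB, List.getD]; omega)]
              rw [pvBL_done (by norm_num)]
            · rw [if_neg h5]
              by_cases h6 : d ≤ 13
              · rw [if_pos h6]
                rw [pvBL_false (by norm_num) (by norm_num [pvBoundariesB, List.getD]; omega)]
                rw [pvBL_true (by norm_num) (by norm_num [pvBoundariesB, List.getD]; omega)]
                rw [pvBL_true (by norm_num) (by norm_num [pvBoundariesB, List.getD]; omega)]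
                rw [pvBL_false (by norm_num) (by norm_num [pvBoundariesB, List.getD]; omega)]
                rw [pvBL_done (by norm_num)]
              · rw [if_neg h6]
                by_cases h7 : d ≤ 20
                · rw [if_pos h7]
                  rw [pvBL_false (by norm_num) (by norm_num [pvBoundariesB, List.getD]; omega)]
                  rw [pvBL_true (by norm_num) (by norm_num [pvBoundariesB, List.getD]; omega)]
                  rw [pvBL_true (by norm_num) (by norm_num [pvBoundariesB, List.getD]; omega)]
                  rw [pvBL_true (by norm_num) (by norm_num [pvBoundariesB, List.getD]; omega)]
                  rw [pvBL_done (by norm_num)]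
                · rw [if_neg h7]
                  by_cases h8 : d ≤ 30
                  · rw [if_pos h8]
                    rw [pvBL_true (by norm_num) (by norm_num [pvBoundariesB, List.getD]; omega)]
                    rw [pvBL_false (by norm_num) (by norm_num [pvBoundariesB, List.getD]; omega)]
                    rw [pvBL_false (by norm_num) (by norm_num [pvBoundariesB, List.getD]; omega)]
                    rw [pvBL_false (by norm_num) (by norm_num [pvBoundariesB, List.getD]; omega)]
                    rw [pvBL_done (by norm_num)]
                  · rw [if_neg h8]
                    by_cases h9 : d ≤ 50
                    · rw [if_pos h9]
                      rw [pvBL_true (by norm_num) (by norm_num [pvBoundariesB, List.getD]; omega)]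
                      rw [pvBL_false (by norm_num) (by norm_num [pvBoundariesB, List.getD]; omega)]
                      rw [pvBL_false (by norm_num) (by norm_num [pvBoundariesB, List.getD]; omega)]
                      rw [pvBL_true (by norm_num) (by norm_num [pvBoundariesB, List.getD]; omega)]
                      rw [pvBL_done (by norm_num)]
                    · rw [if_neg h9]
                      by_cases h10 : d ≤ 80
                      · rw [if_pos h10]
                        rw [pvBL_true (by norm_num) (by norm_num [pvBoundariesB, List.getD]; omega)]
                        rw [pvBL_false (by norm_num) (by norm_num [pvBoundariesB, List.getD]; omega)]
                        rw [pvBL_true (by norm_num) (by norm_num [pvBoundariesB, List.getD]; omega)]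
                        rw [pvBL_false (by norm_num) (by norm_num [pvBoundariesB, List.getD]; omega)]
                        rw [pvBL_done (by norm_num)]
                      · rw [if_neg h10]
                        by_cases h11 : d ≤ 120
                        · rw [if_pos h11]
                          rw [pvBL_true (by norm_num) (by norm_num [pvBoundariesB, List.getD]; omega)]
                          rw [pvBL_false (by norm_num) (by norm_num [pvBoundariesB, List.getD]; omega)]
                          rw [pvBL_true (by norm_num) (by norm_num [pvBoundariesB, List.getD]; omega)]
                          rw [pvBL_true (by norm_num) (by norm_num [pvBoundariesB, List.getD]; omega)]
                          rw [pvBL_done (by norm_num)]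
                        · rw [if_neg h11]
                          by_cases h12 : d ≤ 200
                          · rw [if_pos h12]
                            rw [pvBL_true (by norm_num) (by norm_num [pvBoundariesB, List.getD]; omega)]
                            rw [pvBL_true (by norm_num) (by norm_num [pvBoundariesB, List.getD]; omega)]
                            rw [pvBL_false (by norm_num) (by norm_num [pvBoundariesB, List.getD]; omega)]
                            rw [pvBL_false (by norm_num) (by norm_num [pvBoundariesB, List.getD]; omega)]
                            rw [pvBL_done (by norm_num)]
                          · rw [if_neg h12]
                            by_cases h13 : d ≤ 500
                            · rw [if_pos h13]
                              rw [pvBL_true (by norm_num) (by norm_num [pvBoundariesB, List.getD]; omega)]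
                              rw [pvBL_true (by norm_num) (by norm_num [pvBoundariesB, List.getD]; omega)]
                              rw [pvBL_false (by norm_num) (by norm_num [pvBoundariesB, List.getD]; omega)]
                              rw [pvBL_true (by norm_num) (by norm_num [pvBoundariesB, List.getD]; omega)]
                              rw [pvBL_done (by norm_num)]
                            · rw [if_neg h13]
                              by_cases h14 : d ≤ 1000
                              · rw [if_pos h14]
                                rw [pvBL_true (by norm_num) (by norm_num [pvBoundariesB, List.getD]; omega)]
                                rw [pvBL_true (by norm_num) (by norm_num [pvBoundariesB, List.getD]; omega)]
                                rw [pvBL_true (by norm_num) (by norm_num [pvBoundariesB, List.getD]; omega)]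
                                rw [pvBL_false (by norm_num) (by norm_num [pvBoundariesB, List.getD]; omega)]
                                rw [pvBL_done (by norm_num)]
                              · rw [if_neg h14]
                                rw [pvBL_true (by norm_num) (by norm_num [pvBoundariesB, List.getD]; omega)]
                                rw [pvBL_true (by norm_num) (by norm_num [pvBoundariesB, List.getD]; omega)]
                                rw [pvBL_true (by norm_num) (by norm_num [pvBoundariesB, List.getD]; omega)]
                                rw [pvBL_true (by norm_num) (by norm_num [pvBoundariesB, List.getD]; omega)]
                                rw [pvBL_done (by norm_num)]

-- ===== VERDICT (by name: the statement is the Claim_ definition above) =====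
set_option maxHeartbeats 1600000 in
theorem compute_distance_bucket_spec : Claim_equal_compute_distance_bucket := by
  intro a_s a_e o_s o_e nb _
  unfold Spec_compute_distance_bucket
  unfold compute_distance_bucket compute_distance_bucket_alt
  by_cases h : a_s = -1 ∨ o_s = -1
  · simp only [if_pos h]
  · simp only [if_neg h]
    have hd : (if a_e < o_s then o_s - a_e - 1
               else if o_e < a_s then a_s - o_e - 1 else 0) =
              (if a_e < o_s then o_s - a_e - 1 else max 0 (a_s - o_e - 1)) := by
      split_ifs <;> omega
    rw [hd]
    rw [pvBisect_eval]
    rw [show pvBoundariesB.length = 15 from rfl]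
    generalize (if a_e < o_s then o_s - a_e - 1 else max 0 (a_s - o_e - 1)) = D
    simp only [pvBucketLoop]
    by_cases h0 : D ≤ 0
    · simp only [if_pos h0]
      norm_num
    · simp only [if_neg h0]
      by_cases h1 : D ≤ 1
      · simp only [if_pos h1]
        norm_num
      · simp only [if_neg h1]
        by_cases h2 : D ≤ 2
        · simp only [if_pos h2]
          norm_num
        · simp only [if_neg h2]
          by_cases h3 : D ≤ 3
          · simp only [if_pos h3]
            norm_num
          · simp only [if_neg h3]
            by_cases h4 : D ≤ 5
            · simp only [if_pos h4]
              norm_num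
            · simp only [if_neg h4]
              by_cases h5 : D ≤ 8
              · simp only [if_pos h5]
                norm_num
              · simp only [if_neg h5]
                by_cases h6 : D ≤ 13
                · simp only [if_pos h6]
                  norm_num
                · simp only [if_neg h6]
                  by_cases h7 : D ≤ 20
                  · simp only [if_pos h7]
                    norm_num
                  · simp only [if_neg h7]
                    by_cases h8 : D ≤ 30
                    · simp only [if_pos h8]
                      norm_num
                    · simp only [if_neg h8]
                      by_cases h9 : D ≤ 50
                      · simp only [if_pos h9]
                        norm_num
                      · simp only [if_neg h9]
                        by_cases h10 : D ≤ 80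
                        · simp only [if_pos h10]
                          norm_num
                        · simp only [if_neg h10]
                          by_cases h11 : D ≤ 120
                          · simp only [if_pos h11]
                            norm_num
                          · simp only [if_neg h11]
                            by_cases h12 : D ≤ 200
                            · simp only [if_pos h12]
                              norm_num
                            · simp only [if_neg h12]
                              by_cases h13 : D ≤ 500
                              · simp only [if_pos h13]
                                norm_num
                              · simp only [if_neg h13]
                                by_cases h14 : D ≤ 1000
                                · simp only [if_pos h14]
                                  norm_num
                                · simp only [if_neg h14]
                                  norm_num
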